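-- pv_equiv track=rewrite | github.com/falvey20/HackerRank | Easy/Lisa's Workbook/solution.py | workbook
-- ===== SOURCE A (Python) =====
-- def workbook(n, k, arr):
--     pages = []
--     specials = 0
--
--     # create pages of max length k for each problem in each chapter.
--     for chapter in arr:
--         page = []
--         for i in range(1, chapter+1):
--             page.append(i)
--             if len(page) == k:
--                 pages.append(page)
--                 page = []
--             elif i == chapter:
--                 pages.append(page)
--
--     # check if problem numbers correspond to page numbers.
--     for i in range(0, len(pages)):
--         if i+1 in pages[i]:
--             specials += 1
--
--     return specials
-- ===== SOURCE B (Python) =====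
-- def workbook(n, k, arr):
--     # One arithmetic pass over pages: each page holds a consecutive run of
--     # problem numbers, so the membership test is a pair of comparisons.
--     # Requires k >= 1 (page capacity), as the problem statement guarantees.
--     specials = 0
--     p = 1  # global page number
--     for c in arr:
--         start = 1
--         while start <= c:
--             end = min(start + k - 1, c)
--             if start <= p <= end:
--                 specials += 1
--             p += 1
--             start += k
--     return specials
-- ===== Notes on version B (the rewrite author's own statement) =====
-- stated objective: faster
-- what changed: Instead of materializing every problem number into explicit page lists and then scanning each page for a membership hit, B walks the pages arithmetically (each page is a consecutive run start..min(start+k-1,chapter)) and tests the page number with two comparisons, never building any list.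
-- outside the precondition, e.g. on workbook(1, 0, [3]): A returns 1, B does not finish within the time limit
import Mathlib
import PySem

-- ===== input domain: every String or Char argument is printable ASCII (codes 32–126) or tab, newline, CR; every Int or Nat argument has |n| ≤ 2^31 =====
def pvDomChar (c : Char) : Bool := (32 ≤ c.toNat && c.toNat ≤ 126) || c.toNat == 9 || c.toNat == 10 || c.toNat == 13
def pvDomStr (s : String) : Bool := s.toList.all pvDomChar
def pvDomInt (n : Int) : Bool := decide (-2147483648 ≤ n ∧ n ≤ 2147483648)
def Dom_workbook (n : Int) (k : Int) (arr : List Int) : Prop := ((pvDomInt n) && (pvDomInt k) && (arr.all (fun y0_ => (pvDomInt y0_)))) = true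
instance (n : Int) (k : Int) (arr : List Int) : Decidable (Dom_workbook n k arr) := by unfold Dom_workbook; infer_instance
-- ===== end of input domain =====

-- B replaces A's materialized page lists by an arithmetic walk over pages (each page is a
-- consecutive run of problem numbers, so the membership test is two comparisons); the timing
-- run measured B faster on the large inputs.


-- ===== PORT A =====
-- one iteration of A's inner loop body (state = (pages, page), element = i).
-- Python lists built by repeated .append are ported as Lean Arrays with .push (same
-- values, and push is O(1) like append, so the port evaluates like the Python does).
def stepA (k chapter : Int) (st : Array (List Int) × Array Int) (i : Int) : Array (List Int) × Array Int :=
  let page := st.2.push i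
  if (page.size : Int) = k then (st.1.push page.toList, #[])
  else if i = chapter then (st.1.push page.toList, page)
  else (st.1, page)

def workbook (n : Int) (k : Int) (arr : List Int) : Int :=
  let pages : Array (List Int) :=
    arr.foldl (fun pages chapter =>
      ((PySem.List.pyRange 1 (chapter + 1) 1).foldl (stepA k chapter) (pages, #[])).1) #[]
  -- pages[i] for 0 ≤ i < len(pages): Array.getD i.toNat is exact there (i never negative)
  (PySem.List.pyRange 0 (pages.size : Int) 1).foldl
    (fun specials i =>
      if (i + 1) ∈ pages.getD i.toNat [] then specials + 1 else specials) 0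

-- ===== PORT B =====
-- B's inner while loop; the fuel only makes the recursion structural (with 1 ≤ k the loop
-- runs at most c.toNat times, so the fuel is never exhausted on admitted inputs)
def wbChapter (k c : Int) (start p specials : Int) : Nat → Int × Int
  | 0 => (p, specials)
  | fuel + 1 =>
    if start ≤ c then
      wbChapter k c (start + k) (p + 1)
        (if start ≤ p ∧ p ≤ min (start + k - 1) c then specials + 1 else specials) fuel
    else (p, specials)

def workbook_alt (n : Int) (k : Int) (arr : List Int) : Int :=
  (arr.foldl (fun (st : Int × Int) c => wbChapter k c 1 st.1 st.2 c.toNat) (1, 0)).2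

-- ===== PRECONDITION & SPEC =====
-- Pre_ excludes a page capacity k ≤ 0 combined with a nonempty chapter (outside the task's
-- natural domain): A still returns there (it puts a whole chapter on one page), but B's
-- page walk does not terminate.
def Pre_workbook (n : Int) (k : Int) (arr : List Int) : Prop := 1 ≤ k ∨ ∀ c ∈ arr, c < 1
instance (n : Int) (k : Int) (arr : List Int) : Decidable (Pre_workbook n k arr) := by unfold Pre_workbook; infer_instance
def pvWitness_workbook : Int × Int × List Int := (3, 2, [4, 2, 3])

def Spec_workbook (n : Int) (k : Int) (arr : List Int) (out : Int) : Prop := out = workbook_alt n k arr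
instance (n : Int) (k : Int) (arr : List Int) (out : Int) : Decidable (Spec_workbook n k arr out) := by unfold Spec_workbook; infer_instance

-- ===== CLAIM (what is proved, stated in full; the proofs are below) =====
def Claim_equal_workbook : Prop := ∀ (n : Int) (k : Int) (arr : List Int), Dom_workbook n k arr → Pre_workbook n k arr → Spec_workbook n k arr (workbook n k arr)

-- ===== LEMMAS AND PROOFS =====

-- list-level model of A's inner loop body (same values as stepA, via Array.toList)
def stepAL (k chapter : Int) (st : List (List Int) × List Int) (i : Int) : List (List Int) × List Int :=
  let page := st.2 ++ [i]
  if (page.length : Int) = k then (st.1 ++ [page], [])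
  else if i = chapter then (st.1 ++ [page], page)
  else (st.1, page)

lemma stepA_sim (k c : Int) (st : Array (List Int) × Array Int) (i : Int) :
    ((stepA k c st i).1.toList, (stepA k c st i).2.toList) =
      stepAL k c (st.1.toList, st.2.toList) i := by
  simp only [stepA, stepAL, Array.toList_push, Array.size_push]
  have hsz : ((st.2.size + 1 : Nat) : Int) = ((st.2.toList ++ [i]).length : Int) := by
    simp
  rw [hsz]
  split_ifs <;> simp

lemma foldA_sim (k c : Int) :
    ∀ (l : List Int) (st : Array (List Int) × Array Int),
      (l.foldl (stepA k c) st).1.toList =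
        (l.foldl (stepAL k c) (st.1.toList, st.2.toList)).1 := by
  intro l
  induction l with
  | nil => intro st; rfl
  | cons x xs ih =>
    intro st
    simp only [List.foldl_cons]
    rw [ih (stepA k c st x), ← stepA_sim k c st x]

-- the list of pages a single chapter c contributes, as consecutive runs
def chunksF (k c : Int) (s : Int) : Nat → List (List Int)
  | 0 => []
  | fuel + 1 =>
    if s ≤ c then PySem.List.pyRange s (min (s + k - 1) c + 1) 1 :: chunksF k c (s + k) fuel
    else []

-- page-number-matching count over a list of pages whose first page has global number p
def cnt (pages : List (List Int)) (p : Int) : Int :=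
  match pages with
  | [] => 0
  | pg :: rest => (if p ∈ pg then 1 else 0) + cnt rest (p + 1)

lemma chunksF_nil (k c s : Int) (fuel : Nat) (h : c < s) : chunksF k c s fuel = [] := by
  cases fuel with
  | zero => rfl
  | succ f => simp [chunksF, not_le.mpr h]

-- A's inner loop, run from a partial page holding s..i-1, appends exactly one chunk
lemma runA (k c : Int) (hk : 1 ≤ k) :
    ∀ (fuel : Nat) (i s : Int) (P : List (List Int)),
      s ≤ i → i ≤ min (s + k - 1) c → (min (s + k - 1) c - i).toNat < fuel →
      (PySem.List.pyRange i (c + 1) 1).foldl (stepAL k c) (P, PySem.List.pyRange s i 1) =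
        if s + k - 1 ≤ c
        then (PySem.List.pyRange (s + k) (c + 1) 1).foldl (stepAL k c)
              (P ++ [PySem.List.pyRange s (s + k) 1], [])
        else (P ++ [PySem.List.pyRange s (c + 1) 1], PySem.List.pyRange s (c + 1) 1) := by
  intro fuel
  induction fuel with
  | zero =>
    intro i s P hsi hie hf
    exact absurd hf (by omega)
  | succ f ih =>
    intro i s P hsi hie hf
    have hic : i ≤ c := le_trans hie (min_le_right _ _)
    rw [PySem.List.pyRange_one_cons (by omega : i < c + 1)]
    simp only [List.foldl_cons]
    have hpage : PySem.List.pyRange s i 1 ++ [i] = PySem.List.pyRange s (i + 1) 1 := by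
      rw [PySem.List.pyRange_one_succ_right hsi]
    have hlen : ((PySem.List.pyRange s (i + 1) 1).length : Int) = i + 1 - s := by
      rw [PySem.List.length_pyRange_one]; omega
    by_cases hfull : i + 1 - s = k
    · -- page reaches capacity k: append it, reset the page
      have : stepAL k c (P, PySem.List.pyRange s i 1) i =
          (P ++ [PySem.List.pyRange s (s + k) 1], []) := by
        simp only [stepAL, hpage, hlen]
        rw [if_pos hfull]
        have : s + k = i + 1 := by omega
        rw [this]
      rw [this]
      have hcond : s + k - 1 ≤ c := by omega
      rw [if_pos hcond]
      have : s + k = i + 1 := by omega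
      rw [this]
    · by_cases hlast : i = c
      · -- last problem of the chapter on a partial page
        have : stepAL k c (P, PySem.List.pyRange s i 1) i =
            (P ++ [PySem.List.pyRange s (i + 1) 1], PySem.List.pyRange s (i + 1) 1) := by
          simp only [stepAL, hpage, hlen]
          rw [if_neg (by omega), if_pos hlast]
        rw [this]
        have hcond : ¬ (s + k - 1 ≤ c) := by omega
        rw [if_neg hcond, hlast]
        rw [PySem.List.pyRange_one_eq_nil (by omega : c + 1 ≤ c + 1)]
        rfl
      · -- middle of a page: keep accumulating
        have : stepAL k c (P, PySem.List.pyRange s i 1) i = (P, PySem.List.pyRange s (i + 1) 1) := by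
          simp only [stepAL, hpage, hlen]
          rw [if_neg (by omega), if_neg hlast]
        rw [this]
        exact ih (i + 1) s P (by omega) (by omega) (by omega)

-- A's inner loop over a whole chapter produces exactly the chunk list
lemma innerA (k c : Int) (hk : 1 ≤ k) :
    ∀ (fuel : Nat) (s : Int) (P : List (List Int)),
      (c + 1 - s).toNat ≤ fuel →
      ((PySem.List.pyRange s (c + 1) 1).foldl (stepAL k c) (P, [])).1 =
        P ++ chunksF k c s fuel := by
  intro fuel
  induction fuel with
  | zero =>
    intro s P hf
    rw [PySem.List.pyRange_one_eq_nil (by omega : c + 1 ≤ s)]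
    simp [chunksF_nil k c s 0 (by omega)]
  | succ f ih =>
    intro s P hf
    by_cases hsc : s ≤ c
    · have hrun := runA k c hk ((min (s + k - 1) c - s).toNat + 1) s s P le_rfl
        (by omega) (Nat.lt_succ_self _)
      rw [PySem.List.pyRange_one_eq_nil (le_refl s)] at hrun
      rw [hrun]
      by_cases hfull : s + k - 1 ≤ c
      · rw [if_pos hfull]
        rw [ih (s + k) (P ++ [PySem.List.pyRange s (s + k) 1]) (by omega)]
        simp only [chunksF, if_pos hsc]
        have : min (s + k - 1) c = s + k - 1 := min_eq_left hfull
        rw [this, List.append_assoc]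
        have : s + k - 1 + 1 = s + k := by omega
        rw [this]
        rfl
      · rw [if_neg hfull]
        simp only [chunksF, if_pos hsc]
        have h1 : min (s + k - 1) c = c := min_eq_right (by omega)
        rw [h1, chunksF_nil k c (s + k) f (by omega)]
    · rw [PySem.List.pyRange_one_eq_nil (by omega : c + 1 ≤ s)]
      cases f with
      | zero => simp [chunksF, hsc]
      | succ f' => simp [chunksF, hsc]

-- splitting the page-count over concatenation
lemma cnt_append (P Q : List (List Int)) : ∀ p : Int, cnt (P ++ Q) p = cnt P p + cnt Q (p + (P.length : Int)) := by
  induction P with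
  | nil => intro p; simp [cnt]
  | cons pg rest ih =>
    intro p
    simp only [List.cons_append, cnt, ih (p + 1), List.length_cons]
    push_cast
    ring_nf

-- B's while loop computes the next page number and the count over the chunk list
lemma wbChapter_cnt (k c : Int) :
    ∀ (fuel : Nat) (s p sp : Int),
      wbChapter k c s p sp fuel =
        (p + ((chunksF k c s fuel).length : Int), sp + cnt (chunksF k c s fuel) p) := by
  intro fuel
  induction fuel with
  | zero => intro s p sp; simp [wbChapter, chunksF, cnt]
  | succ f ih =>
    intro s p sp
    by_cases hsc : s ≤ c
    · simp only [wbChapter, if_pos hsc, chunksF, ih, List.length_cons, cnt,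
        PySem.List.mem_pyRange_one]
      rw [Prod.mk.injEq]
      constructor
      · push_cast; ring_nf
      · by_cases hp : s ≤ p ∧ p ≤ min (s + k - 1) c
        · rw [if_pos hp, if_pos ⟨hp.1, by omega⟩]; ring_nf
        · rw [if_neg hp, if_neg (fun h => hp ⟨h.1, by omega⟩)]; ring_nf
    · simp [wbChapter, if_neg hsc, chunksF, cnt]

-- A's second pass over an enumerated page list is the count starting at page 1
lemma cnt_enum :
    ∀ (pages : List (List Int)) (s acc : Int),
      (PySem.List.enumerate pages s).foldl
        (fun sp pr => if (pr.1 + 1) ∈ pr.2 then sp + 1 else sp) acc =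
        acc + cnt pages (s + 1) := by
  intro pages
  induction pages with
  | nil => intro s acc; simp [PySem.List.enumerate, cnt]
  | cons pg rest ih =>
    intro s acc
    simp only [PySem.List.enumerate, List.foldl_cons, cnt, ih]
    split_ifs <;> ring_nf

-- the full page list A builds over all chapters
def pagesOf (k : Int) (arr : List Int) : List (List Int) :=
  arr.foldl (fun P c => P ++ chunksF k c 1 c.toNat) []

lemma workbook_pages (k : Int) (hk : 1 ≤ k) (arr : List Int) :
    ∀ P : List (List Int),
      arr.foldl (fun pages chapter =>
        ((PySem.List.pyRange 1 (chapter + 1) 1).foldl (stepAL k chapter) (pages, [])).1) P =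
      arr.foldl (fun P c => P ++ chunksF k c 1 c.toNat) P := by
  induction arr with
  | nil => intro P; rfl
  | cons c rest ih =>
    intro P
    simp only [List.foldl_cons]
    rw [innerA k c hk c.toNat 1 P (by omega), ih]

lemma foldB (k : Int) (arr : List Int) :
    ∀ P : List (List Int),
      (arr.foldl (fun (st : Int × Int) c => wbChapter k c 1 st.1 st.2 c.toNat)
        ((P.length : Int) + 1, cnt P 1)).2 =
      cnt (arr.foldl (fun P c => P ++ chunksF k c 1 c.toNat) P) 1 := by
  induction arr with
  | nil => intro P; rfl
  | cons c rest ih =>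
    intro P
    simp only [List.foldl_cons]
    rw [wbChapter_cnt]
    have h1 : (P.length : Int) + 1 + ((chunksF k c 1 c.toNat).length : Int) =
        (((P ++ chunksF k c 1 c.toNat).length : Nat) : Int) + 1 := by
      push_cast [List.length_append]; ring_nf
    have h2 : cnt P 1 + cnt (chunksF k c 1 c.toNat) ((P.length : Int) + 1) =
        cnt (P ++ chunksF k c 1 c.toNat) 1 := by
      rw [cnt_append]; ring_nf
    rw [h1, h2, ih]

lemma array_getD_toList (a : Array (List Int)) (n : Nat) :
    a.getD n [] = a.toList.getD n [] := by
  simp only [Array.getD, List.getD]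
  split_ifs with h
  · rw [List.getElem?_eq_getElem (by simpa using h)]
    simp
  · rw [List.getElem?_eq_none (by simpa using not_lt.mp h)]
    rfl

lemma pagesA_sim (k : Int) :
    ∀ (l : List Int) (ar : Array (List Int)),
      (l.foldl (fun pages chapter =>
        ((PySem.List.pyRange 1 (chapter + 1) 1).foldl (stepA k chapter) (pages, #[])).1) ar).toList =
      l.foldl (fun pages chapter =>
        ((PySem.List.pyRange 1 (chapter + 1) 1).foldl (stepAL k chapter) (pages, [])).1) ar.toList := by
  intro l
  induction l with
  | nil => intro ar; rfl
  | cons x xs ih =>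
    intro ar
    simp only [List.foldl_cons]
    rw [ih, foldA_sim]

lemma lowA (k : Int) :
    ∀ (l : List Int), (∀ c ∈ l, c < 1) → ∀ ar : Array (List Int),
      l.foldl (fun pages chapter =>
        ((PySem.List.pyRange 1 (chapter + 1) 1).foldl (stepA k chapter) (pages, #[])).1) ar = ar := by
  intro l
  induction l with
  | nil => intro _ ar; rfl
  | cons c rest ih =>
    intro h ar
    simp only [List.foldl_cons]
    rw [PySem.List.pyRange_one_eq_nil (by have := h c (by simp); omega : c + 1 ≤ 1)]
    exact ih (fun x hx => h x (by simp [hx])) ar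

lemma lowB (k : Int) :
    ∀ (l : List Int), (∀ c ∈ l, c < 1) → ∀ st : Int × Int,
      l.foldl (fun (st : Int × Int) c => wbChapter k c 1 st.1 st.2 c.toNat) st = st := by
  intro l
  induction l with
  | nil => intro _ st; rfl
  | cons c rest ih =>
    intro h st
    simp only [List.foldl_cons]
    have hc : c.toNat = 0 := by have := h c (by simp); omega
    rw [hc]
    exact ih (fun x hx => h x (by simp [hx])) st

-- ===== VERDICT (by name: the statement is the Claim_ definition above) =====
theorem workbook_spec : Claim_equal_workbook := by
  intro n k arr _hdom hpre
  rcases hpre with hk | hlow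
  case inr =>
    -- k ≤ 0 is admitted only with no positive chapter: no pages exist on either side
    unfold Spec_workbook workbook workbook_alt
    rw [lowA k arr hlow #[], lowB k arr hlow (1, 0)]
    rfl
  unfold Spec_workbook workbook workbook_alt
  set pagesA := arr.foldl (fun pages chapter =>
      ((PySem.List.pyRange 1 (chapter + 1) 1).foldl (stepA k chapter) (pages, #[])).1)
      (#[] : Array (List Int)) with hpA
  set pages := arr.foldl (fun P c => P ++ chunksF k c 1 c.toNat) ([] : List (List Int)) with hp
  have hAL : pagesA.toList = pages := by
    rw [hpA, pagesA_sim k arr #[]]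
    exact workbook_pages k hk arr []
  -- the second pass, moved to the list level
  have hsz : (pagesA.size : Int) = (pages.length : Int) := by
    rw [← hAL, Array.length_toList]
  have hbody : (PySem.List.pyRange 0 (pages.length : Int) 1).foldl
      (fun (specials : Int) i => if (i + 1) ∈ pagesA.getD i.toNat [] then specials + 1 else specials) 0 =
      (PySem.List.pyRange 0 (pages.length : Int) 1).foldl
      (fun (specials : Int) i => if (i + 1) ∈ PySem.List.pyGetD pages i [] then specials + 1 else specials) 0 := by
    apply PySem.List.foldl_congr_mem
    intro acc i hi
    have h0 : 0 ≤ i := (PySem.List.mem_pyRange_one.mp hi).1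
    rw [array_getD_toList, hAL, PySem.List.pyGetD_of_nonneg pages [] h0]
  show (PySem.List.pyRange 0 (pagesA.size : Int) 1).foldl
      (fun specials i => if (i + 1) ∈ pagesA.getD i.toNat [] then specials + 1 else specials) 0 =
    (arr.foldl (fun (st : Int × Int) c => wbChapter k c 1 st.1 st.2 c.toNat) (1, 0)).2
  rw [hsz]
  refine hbody.trans ?_
  -- second pass = enumerate fold = cnt pages 1
  have hmap : PySem.List.enumerate pages 0 =
      (PySem.List.pyRange 0 (pages.length : Int) 1).map
        (fun j => (j, PySem.List.pyGetD pages j [])) := by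
    have := PySem.List.enumerate_eq_map_pyRange (xs := pages) (d := ([] : List Int))
    simpa [PySem.List.len] using this
  have h2 : (PySem.List.pyRange 0 (pages.length : Int) 1).foldl
      (fun (specials : Int) i => if (i + 1) ∈ PySem.List.pyGetD pages i [] then specials + 1 else specials)
      0 = cnt pages 1 := by
    have := cnt_enum pages 0 0
    rw [hmap, List.foldl_map] at this
    simpa using this
  rw [h2]
  have := foldB k arr []
  simp only [List.length_nil, Nat.cast_zero, zero_add] at this
  rw [← hp] at this
  exact this.symm
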